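-- pv_equiv track=rewrite | github.com/kakaocloud-school-study/codetree | Park/Baekjoon/비슷한단어.py | count_similar_pairs
-- ===== SOURCE A (Python) =====
-- def count_similar_pairs(words):
--     def get_pattern(word):
--         mapping = {}
--         pattern = []
--         next_char = 'a'
--         for char in word:
--             if char not in mapping:
--                 mapping[char] = next_char
--                 next_char = chr(ord(next_char) + 1)
--             pattern.append(mapping[char])
--         return ''.join(pattern)
--
--     patterns = {}
--     for word in words:
--         pattern = get_pattern(word)
--         if pattern in patterns:
--             patterns[pattern] += 1
--         else:
--             patterns[pattern] = 1
--
--     count = 0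
--     for value in patterns.values():
--         if value > 1:
--             count += value * (value - 1) // 2
--
--     return count
-- ===== SOURCE B (Python) =====
-- def count_similar_pairs(words):
--     def similar(u, v):
--         return len(u) == len(v) and all(
--             u.index(a) == v.index(b) for a, b in zip(u, v))
--
--     if not words:
--         return 0
--     u, rest = words[0], words[1:]
--     return sum(1 for v in rest if similar(u, v)) + count_similar_pairs(rest)
-- ===== Notes on version B (the rewrite author's own statement) =====
-- stated objective: alternative
-- what changed: B drops A's canonical-pattern dictionary and grouped v*(v-1)//2 formula entirely: it counts similar pairs by a direct pairwise isomorphism test (equal length and matching first-occurrence index for every zipped character pair), recursing on the tail of the list.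
import Mathlib
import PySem

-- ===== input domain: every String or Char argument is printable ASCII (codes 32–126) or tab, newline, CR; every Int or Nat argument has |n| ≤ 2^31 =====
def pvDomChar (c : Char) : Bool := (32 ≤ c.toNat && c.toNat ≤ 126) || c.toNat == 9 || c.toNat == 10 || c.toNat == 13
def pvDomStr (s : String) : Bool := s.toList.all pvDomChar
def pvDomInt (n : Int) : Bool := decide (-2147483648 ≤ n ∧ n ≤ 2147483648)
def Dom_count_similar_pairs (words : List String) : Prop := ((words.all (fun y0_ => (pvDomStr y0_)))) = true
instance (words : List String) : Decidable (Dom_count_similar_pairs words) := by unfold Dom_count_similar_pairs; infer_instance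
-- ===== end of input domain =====

-- B drops A's canonical-pattern dictionary and grouped v*(v-1)//2 formula: it counts similar pairs directly,
-- testing each pair for string isomorphism (equal length + matching first-occurrence indices of zipped chars),
-- recursing on the tail (alternative decomposition; not claimed faster).

-- ===== PORT A =====
-- inner helper get_pattern of A; chr(ord(next_char)+1) is Char.ofNat (· + 1), exact at the code points reachable here
def getPatternA (word : String) : String :=
  let st := word.toList.foldl (fun (st : PySem.Dict Char Char × Char × List Char) c =>
      let upd := if st.1.contains c = false
        then (st.1.insert c st.2.1, Char.ofNat (st.2.1.toNat + 1))
        else (st.1, st.2.1)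
      (upd.1, upd.2, st.2.2 ++ [upd.1.getD c upd.2]))   -- pattern.append(mapping[char]); key always present, default unused
    (PySem.Dict.empty, 'a', ([] : List Char))
  String.ofList st.2.2   -- ''.join(pattern)

def count_similar_pairs (words : List String) : Int :=
  let patterns := words.foldl (fun d word =>
      let pattern := getPatternA word
      if d.contains pattern then d.modify pattern 0 (· + 1) else d.insert pattern 1)
    PySem.Dict.empty
  patterns.values.foldl (fun count v =>
      if v > 1 then count + PySem.Int.floordiv (v * (v - 1)) 2 else count) 0

-- ===== PORT B =====
-- similar(u, v): len(u) == len(v) and all(u.index(a) == v.index(b) for a, b in zip(u, v));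
-- str.index of a character taken FROM the string is its first-occurrence index, so List.idxOf is exact here
def similarB (u v : String) : Bool :=
  u.toList.length == v.toList.length &&
  (u.toList.zip v.toList).all (fun p => u.toList.idxOf p.1 == v.toList.idxOf p.2)

def count_similar_pairs_alt : (words : List String) → Int
  | [] => 0               -- if not words: return 0
  | u :: rest =>          -- u, rest = words[0], words[1:]
      (rest.foldl (fun s v => if similarB u v then s + 1 else s) 0)   -- sum(1 for v in rest if similar(u, v))
        + count_similar_pairs_alt rest

-- ===== PRECONDITION & SPEC =====
def Spec_count_similar_pairs (words : List String) (out : Int) : Prop := out = count_similar_pairs_alt words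
instance (words : List String) (out : Int) : Decidable (Spec_count_similar_pairs words out) := by unfold Spec_count_similar_pairs; infer_instance

-- ===== CLAIM (what is proved, stated in full; the proofs are below) =====
def Claim_equal_count_similar_pairs : Prop := ∀ (words : List String), Dom_count_similar_pairs words → Spec_count_similar_pairs words (count_similar_pairs words)

-- ===== LEMMAS AND PROOFS =====

-- the label 'a'+k that A's get_pattern assigns to the k-th distinct character of a word
def lab (k : Nat) : Char := Char.ofNat (97 + k)

-- A's canonical pattern in closed form: each char labelled by its first-insertion rank
def canonA {α : Type} [BEq α] (l : List α) : List Char :=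
  l.map (fun c => lab ((PySem.Set.ofList l).idxOf c))

-- the first-occurrence-index pattern (B's similarity test is exactly equality of these)
def canonB {α : Type} [BEq α] (l : List α) : List Int :=
  l.map (fun c => (l.idxOf c : Int))

-- number of unordered pairs of positions with equal element (head pairs with its copies in the tail)
def pairsCnt {β : Type} [BEq β] : List β → Nat
  | [] => 0
  | a :: t => t.count a + pairsCnt t

def Tn (n : Nat) : Nat := n * (n - 1) / 2

lemma idxOf_inj_of_mem {α : Type} [BEq α] [LawfulBEq α] {l : List α} {c d : α}
    (hc : c ∈ l) (hd : d ∈ l) (h : l.idxOf c = l.idxOf d) : c = d := by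
  have h1 := List.getElem_idxOf (xs := l) (List.idxOf_lt_length_of_mem hc)
  have h2 := List.getElem_idxOf (xs := l) (List.idxOf_lt_length_of_mem hd)
  rw [← h1, ← h2]
  simp [h]

lemma idxOf_map_inj {α β : Type} [BEq α] [LawfulBEq α] [BEq β] [LawfulBEq β]
    {f : α → β} {l : List α} (hf : ∀ a ∈ l, ∀ b ∈ l, f a = f b → a = b)
    {c : α} (hc : c ∈ l) : (l.map f).idxOf (f c) = l.idxOf c := by
  induction l with
  | nil => simp at hc
  | cons a t ih =>
    rcases List.mem_cons.mp hc with rfl | hct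
    · simp
    · by_cases hac : a = c
      · subst hac; simp
      · have hfac : (f a == f c) = false := by
          simp only [beq_eq_false_iff_ne, ne_eq]
          intro he
          exact hac (hf a (by simp) c (by simp [hct]) he)
        have hac' : (a == c) = false := by simp [hac]
        simp only [List.map_cons, List.idxOf_cons, hfac, hac', cond_false]
        have := ih (fun x hx y hy => hf x (by simp [hx]) y (by simp [hy])) hct
        omega

lemma ofList_map_inj {α β : Type} [BEq α] [LawfulBEq α] [BEq β] [LawfulBEq β]
    {f : α → β} {l : List α} (hf : ∀ a ∈ l, ∀ b ∈ l, f a = f b → a = b) :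
    PySem.Set.ofList (l.map f) = (PySem.Set.ofList l).map f := by
  induction l using List.reverseRecOn with
  | nil => simp [PySem.Set.ofList_nil]
  | append_singleton t x ih =>
    have hf' : ∀ a ∈ t, ∀ b ∈ t, f a = f b → a = b := fun a ha b hb =>
      hf a (by simp [ha]) b (by simp [hb])
    rw [List.map_append, List.map_singleton, PySem.Set.ofList_append_singleton,
        PySem.Set.ofList_append_singleton, ih hf']
    by_cases hx : x ∈ t
    · have hx1 : x ∈ PySem.Set.ofList t := (PySem.Set.mem_ofList t x).mpr hx
      have hx2 : f x ∈ (PySem.Set.ofList t).map f := List.mem_map_of_mem hx1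
      rw [PySem.Set.add_of_mem hx2, PySem.Set.add_of_mem hx1]
    · have hx1 : x ∉ PySem.Set.ofList t := fun hmem => hx ((PySem.Set.mem_ofList t x).mp hmem)
      have hx2 : f x ∉ (PySem.Set.ofList t).map f := by
        intro hmem
        obtain ⟨a, ha, hfa⟩ := List.mem_map.mp hmem
        have ha' : a ∈ t := (PySem.Set.mem_ofList t a).mp ha
        exact hx (hf a (by simp [ha']) x (by simp) hfa ▸ ha')
      rw [PySem.Set.add_of_not_mem hx2, PySem.Set.add_of_not_mem hx1, List.map_append,
          List.map_singleton]

lemma canonB_map_inj {α β : Type} [BEq α] [LawfulBEq α] [BEq β] [LawfulBEq β]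
    {f : α → β} {l : List α} (hf : ∀ a ∈ l, ∀ b ∈ l, f a = f b → a = b) :
    canonB (l.map f) = canonB l := by
  unfold canonB
  rw [List.map_map]
  apply List.map_congr_left
  intro c hc
  simp only [Function.comp]
  rw [idxOf_map_inj hf hc]

lemma canonA_map_inj {α β : Type} [BEq α] [LawfulBEq α] [BEq β] [LawfulBEq β]
    {f : α → β} {l : List α} (hf : ∀ a ∈ l, ∀ b ∈ l, f a = f b → a = b) :
    canonA (l.map f) = canonA l := by
  unfold canonA
  rw [List.map_map, ofList_map_inj hf]
  apply List.map_congr_left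
  intro c hc
  simp only [Function.comp]
  congr 1
  have hfS : ∀ a ∈ PySem.Set.ofList l, ∀ b ∈ PySem.Set.ofList l, f a = f b → a = b := by
    intro a ha b hb
    exact hf a ((PySem.Set.mem_ofList l a).mp ha) b ((PySem.Set.mem_ofList l b).mp hb)
  exact idxOf_map_inj hfS ((PySem.Set.mem_ofList l c).mpr hc)

lemma lab_toNat {k : Nat} (hk : k ≤ 130) : (lab k).toNat = 97 + k := by
  unfold lab
  rw [Char.toNat_ofNat]
  have : (97 + k).isValidChar := by unfold Nat.isValidChar; omega
  simp [this]

lemma lab_inj {k k' : Nat} (hk : k ≤ 127) (hk' : k' ≤ 127) (h : lab k = lab k') : k = k' := by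
  have h1 := lab_toNat (by omega : k ≤ 130)
  rw [h, lab_toNat (by omega : k' ≤ 130)] at h1
  omega

lemma char_toNat_inj (a b : Char) (h : a.toNat = b.toNat) : a = b :=
  Char.ext (UInt32.toNat_inj.mp h)

lemma small_ofList {l : List Char} (h : ∀ c ∈ l, pvDomChar c = true) :
    (PySem.Set.ofList l).length ≤ 127 := by
  set S := PySem.Set.ofList l with hS
  have hnd : (S.map Char.toNat).Nodup :=
    (PySem.Set.nodup_ofList l).map char_toNat_inj
  have hsub : (S.map Char.toNat).toFinset ⊆ Finset.range 127 := by
    intro n hn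
    obtain ⟨c, hc, rfl⟩ := List.mem_map.mp (List.mem_toFinset.mp hn)
    have := h c ((PySem.Set.mem_ofList l c).mp hc)
    simp only [pvDomChar, Bool.or_eq_true, Bool.and_eq_true, decide_eq_true_eq, beq_iff_eq] at this
    simp only [Finset.mem_range]
    omega
  have := Finset.card_le_card hsub
  rw [List.toFinset_card_of_nodup hnd, Finset.card_range] at this
  simpa using this

lemma canonA_label_inj {l : List Char} (h : ∀ c ∈ l, pvDomChar c = true) :
    ∀ a ∈ l, ∀ b ∈ l, (fun c => lab ((PySem.Set.ofList l).idxOf c)) a = (fun c => lab ((PySem.Set.ofList l).idxOf c)) b → a = b := by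
  intro a ha b hb hab
  have hsmall := small_ofList h
  have ha' : a ∈ PySem.Set.ofList l := (PySem.Set.mem_ofList l a).mpr ha
  have hb' : b ∈ PySem.Set.ofList l := (PySem.Set.mem_ofList l b).mpr hb
  have hia := List.idxOf_lt_length_of_mem ha'
  have hib := List.idxOf_lt_length_of_mem hb'
  have := lab_inj (by omega) (by omega) hab
  exact idxOf_inj_of_mem ha' hb' this

-- both canonical patterns induce the same equivalence on Dom words
lemma canon_equiv {w v : List Char} (hw : ∀ c ∈ w, pvDomChar c = true) (hv : ∀ c ∈ v, pvDomChar c = true) :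
    canonA w = canonA v ↔ canonB w = canonB v := by
  constructor
  · intro h
    have h1 : canonB (canonA w) = canonB w := canonB_map_inj (canonA_label_inj hw)
    have h2 : canonB (canonA v) = canonB v := canonB_map_inj (canonA_label_inj hv)
    rw [← h1, ← h2, h]
  · intro h
    have hwB : ∀ a ∈ w, ∀ b ∈ w, (fun c => ((w.idxOf c : Int))) a = (fun c => ((w.idxOf c : Int))) b → a = b := by
      intro a ha b hb hab
      simp only at hab
      exact idxOf_inj_of_mem ha hb (by exact_mod_cast hab)
    have hvB : ∀ a ∈ v, ∀ b ∈ v, (fun c => ((v.idxOf c : Int))) a = (fun c => ((v.idxOf c : Int))) b → a = b := by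
      intro a ha b hb hab
      simp only at hab
      exact idxOf_inj_of_mem ha hb (by exact_mod_cast hab)
    have h1 : canonA (canonB w) = canonA w := canonA_map_inj hwB
    have h2 : canonA (canonB v) = canonA v := canonA_map_inj hvB
    rw [← h1, ← h2, h]

-- the model of A's mapping dict: each seen char bound to the label of its first-insertion rank
def dictM (cs : List Char) : PySem.Dict Char Char :=
  PySem.Dict.mk ((PySem.Set.ofList cs).map (fun c => (c, lab ((PySem.Set.ofList cs).idxOf c))))

lemma keys_dictM (cs : List Char) : (dictM cs).keys = PySem.Set.ofList cs := by
  show ((PySem.Set.ofList cs).map _).map Prod.fst = _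
  rw [List.map_map]
  simp [Function.comp_def]

lemma runA_model (cs : List Char) (h : ∀ c ∈ cs, pvDomChar c = true) :
    cs.foldl (fun (st : PySem.Dict Char Char × Char × List Char) c =>
      let upd := if st.1.contains c = false
        then (st.1.insert c st.2.1, Char.ofNat (st.2.1.toNat + 1))
        else (st.1, st.2.1)
      (upd.1, upd.2, st.2.2 ++ [upd.1.getD c upd.2]))
    (PySem.Dict.empty, 'a', ([] : List Char))
    = (dictM cs, lab (PySem.Set.ofList cs).length, cs.map (fun c => lab ((PySem.Set.ofList cs).idxOf c))) := by
  induction cs using List.reverseRecOn with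
  | nil =>
    simp only [List.foldl_nil, List.map_nil]
    rfl
  | append_singleton t x ih =>
    have ht : ∀ c ∈ t, pvDomChar c = true := fun c hc => h c (by simp [hc])
    rw [List.foldl_append, ih ht]
    simp only [List.foldl_cons, List.foldl_nil]
    have hcont : (dictM t).contains x = decide (x ∈ PySem.Set.ofList t) := by
      rw [PySem.Dict.contains_eq_decide_mem_keys, keys_dictM]
    by_cases hx : x ∈ t
    · -- char seen before: dict and next_char unchanged, label of x appended
      have hx1 : x ∈ PySem.Set.ofList t := (PySem.Set.mem_ofList t x).mpr hx
      have hS : PySem.Set.ofList (t ++ [x]) = PySem.Set.ofList t := by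
        rw [PySem.Set.ofList_append_singleton, PySem.Set.add_of_mem hx1]
      have hcont' : (dictM t).contains x = true := by rw [hcont]; simp [hx1]
      have hgetD : ∀ d0, (dictM t).getD x d0 = lab ((PySem.Set.ofList t).idxOf x) := by
        intro d0
        apply PySem.Dict.getD_of_mem_items
        · exact List.mem_map_of_mem hx1
        · rw [keys_dictM]; exact PySem.Set.nodup_ofList t
      simp only [hcont']
      norm_num
      refine ⟨by unfold dictM; rw [hS], by rw [hS], ?_, ?_⟩
      · intro a ha
        rw [hS]
      · rw [hS, hgetD]
    · -- new char: inserted with the current next_char, next_char bumped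
      have hx1 : x ∉ PySem.Set.ofList t := fun hm => hx ((PySem.Set.mem_ofList t x).mp hm)
      have hS : PySem.Set.ofList (t ++ [x]) = PySem.Set.ofList t ++ [x] := by
        rw [PySem.Set.ofList_append_singleton, PySem.Set.add_of_not_mem hx1]
      have hcont' : (dictM t).contains x = false := by rw [hcont]; simp [hx1]
      have hn : (PySem.Set.ofList t).length ≤ 127 := small_ofList ht
      have hidx_stable : ∀ c ∈ PySem.Set.ofList t,
          (PySem.Set.ofList (t ++ [x])).idxOf c = (PySem.Set.ofList t).idxOf c := by
        intro c hc
        rw [hS, List.idxOf_append_of_mem hc]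
      have hidx_x : (PySem.Set.ofList (t ++ [x])).idxOf x = (PySem.Set.ofList t).length := by
        rw [hS, List.idxOf_append, if_neg hx1]
        simp
      simp only [hcont']
      norm_num
      refine ⟨?_, ?_, ?_, ?_⟩
      · apply PySem.Dict.ext
        rw [PySem.Dict.items_insert_of_not_contains _ _ hcont']
        show ((PySem.Set.ofList t).map _) ++ _ = ((PySem.Set.ofList (t ++ [x])).map _)
        rw [hS, List.map_append, List.map_singleton]
        congr 1
        · apply List.map_congr_left
          intro c hc
          rw [← hS, hidx_stable c hc]
        · rw [← hS, hidx_x]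
      · rw [lab_toNat (by omega), hS]
        simp only [List.length_append, List.length_cons, List.length_nil]
        unfold lab
        congr 1
      · intro a ha
        rw [hidx_stable a ((PySem.Set.mem_ofList t a).mpr ha)]
      · rw [hidx_x]

lemma getPatternA_eq {word : String} (h : ∀ c ∈ word.toList, pvDomChar c = true) :
    getPatternA word = String.ofList (canonA word.toList) := by
  unfold getPatternA
  rw [runA_model word.toList h]
  rfl

lemma pairs_snoc {β : Type} [BEq β] [LawfulBEq β] (l : List β) (x : β) :
    pairsCnt (l ++ [x]) = pairsCnt l + l.count x := by
  induction l with
  | nil => simp [pairsCnt]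
  | cons a t ih =>
    by_cases hax : a = x
    · subst hax
      simp only [List.cons_append, pairsCnt, ih, List.count_append, List.count_cons,
        List.count_nil, beq_self_eq_true, if_true]
      omega
    · have h1 : (x == a) = false := by
        simp only [beq_eq_false_iff_ne]; exact fun h => hax h.symm
      have h2 : (a == x) = false := by simp [hax]
      simp only [List.cons_append, pairsCnt, ih, List.count_append, List.count_cons,
        List.count_nil, h1, h2]
      omega

lemma pairs_congr_map {α β γ : Type} [BEq β] [LawfulBEq β] [BEq γ] [LawfulBEq γ]
    {f : α → β} {g : α → γ} (ws : List α)
    (h : ∀ x ∈ ws, ∀ y ∈ ws, (f x = f y ↔ g x = g y)) :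
    pairsCnt (ws.map f) = pairsCnt (ws.map g) := by
  induction ws with
  | nil => simp [pairsCnt]
  | cons a t ih =>
    simp only [List.map_cons, pairsCnt]
    have hcount : (t.map f).count (f a) = (t.map g).count (g a) := by
      simp only [List.count, List.countP_map]
      apply List.countP_congr
      intro y hy
      simp only [Function.comp]
      have := h y (by simp [hy]) a (by simp)
      by_cases hfy : f y = f a
      · simp [hfy, this.mp hfy]
      · have : ¬ g y = g a := fun hg => hfy (this.mpr hg)
        simp [hfy, this]
    rw [hcount, ih (fun x hx y hy => h x (by simp [hx]) y (by simp [hy]))]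

lemma Tn_succ (n : Nat) : Tn (n + 1) = Tn n + n := by
  unfold Tn
  have h1 : (n + 1) * n = n * (n - 1) + 2 * n := by
    cases n with
    | zero => rfl
    | succ m => simp; ring
  rw [Nat.add_sub_cancel, h1, Nat.add_mul_div_left _ _ (by omega : 0 < 2)]

lemma sum_map_update {β : Type} [BEq β] [LawfulBEq β] (K : List β) (x : β) (f f' : β → Nat)
    (hnd : K.Nodup) (hx : x ∈ K) (hagree : ∀ k ∈ K, k ≠ x → f k = f' k) :
    (K.map f).sum + f' x = (K.map f').sum + f x := by
  induction K with
  | nil => simp at hx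
  | cons a t ih =>
    rcases List.mem_cons.mp hx with rfl | hxt
    · have hnotin : x ∉ t := (List.nodup_cons.mp hnd).1
      have hmap : t.map f = t.map f' := List.map_congr_left (fun k hk =>
        hagree k (by simp [hk]) (fun h => hnotin (h ▸ hk)))
      simp [hmap]
      omega
    · have hax : a ≠ x := fun h => (List.nodup_cons.mp hnd).1 (h ▸ hxt)
      have hfa : f a = f' a := hagree a (by simp) hax
      have := ih (List.nodup_cons.mp hnd).2 hxt (fun k hk hkx => hagree k (by simp [hk]) hkx)
      simp [hfa]
      omega

-- Σ over the distinct elements of C(multiplicity, 2) = number of equal pairs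
lemma sumT {β : Type} [BEq β] [LawfulBEq β] (l : List β) :
    ((PySem.Set.ofList l).map (fun k => Tn (l.count k))).sum = pairsCnt l := by
  induction l using List.reverseRecOn with
  | nil => simp [PySem.Set.ofList_nil, pairsCnt]
  | append_singleton t x ih =>
    rw [pairs_snoc, PySem.Set.ofList_append_singleton]
    by_cases hx : x ∈ t
    · have hx1 : x ∈ PySem.Set.ofList t := (PySem.Set.mem_ofList t x).mpr hx
      rw [PySem.Set.add_of_mem hx1]
      have hupd := sum_map_update (PySem.Set.ofList t) x
        (fun k => Tn ((t ++ [x]).count k)) (fun k => Tn (t.count k))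
        (PySem.Set.nodup_ofList t) hx1
        (fun k _ hkx => by
          have hc0 : List.count k [x] = 0 := List.count_eq_zero.mpr (by simp [hkx])
          simp [List.count_append, hc0])
      have hc1 : List.count x [x] = 1 := by simp
      simp only [List.count_append, hc1] at hupd ⊢
      rw [Tn_succ (t.count x)] at hupd
      omega
    · have hx1 : x ∉ PySem.Set.ofList t := fun h => hx ((PySem.Set.mem_ofList t x).mp h)
      rw [PySem.Set.add_of_not_mem hx1, List.map_append, List.sum_append]
      have hcongr : ∀ k ∈ PySem.Set.ofList t, Tn ((t ++ [x]).count k) = Tn (t.count k) := by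
        intro k hk
        have hkx : (k == x) = false := by
          simp only [beq_eq_false_iff_ne]
          exact fun h => hx (h ▸ (PySem.Set.mem_ofList t k).mp hk)
        have hc0 : List.count k [x] = 0 :=
          List.count_eq_zero.mpr (by simpa using beq_eq_false_iff_ne.mp hkx)
        simp [List.count_append, hc0]
      have hxcnt : t.count x = 0 := List.count_eq_zero.mpr hx
      have h2 : (List.map (fun k => Tn ((t ++ [x]).count k)) [x]).sum = 0 := by
        simp [List.count_append, hxcnt, Tn]
      rw [List.map_congr_left hcongr, ih, h2, hxcnt]

-- map f a = map g b iff same length and pointwise agreement along the zip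
lemma map_eq_map_iff_zip {α β : Type} [BEq β] [LawfulBEq β] (f g : α → β) :
    ∀ (a b : List α), a.map f = b.map g ↔
      (a.length = b.length ∧ ∀ p ∈ a.zip b, f p.1 = g p.2)
  | [], [] => by simp
  | [], y :: b => by simp
  | x :: a, [] => by simp
  | x :: a, y :: b => by
    simp only [List.map_cons, List.cons.injEq, List.length_cons, List.zip_cons_cons,
      List.mem_cons]
    rw [map_eq_map_iff_zip f g a b]
    constructor
    · rintro ⟨h1, h2, h3⟩
      exact ⟨by omega, fun p hp => by rcases hp with rfl | hp; exact h1; exact h3 p hp⟩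
    · rintro ⟨h1, h2⟩
      exact ⟨h2 (x, y) (Or.inl rfl), by omega, fun p hp => h2 p (Or.inr hp)⟩

-- B's similarity test is equality of the first-occurrence-index patterns
lemma similarB_iff (u v : String) :
    similarB u v = true ↔ canonB u.toList = canonB v.toList := by
  unfold similarB canonB
  rw [map_eq_map_iff_zip]
  simp [List.all_eq_true]

-- counting fold with an Int accumulator = countP
lemma foldl_count_eq_countP {α : Type} (p : α → Bool) (l : List α) (s : Int) :
    l.foldl (fun s v => if p v then s + 1 else s) s = s + (l.countP p : Int) := by
  induction l generalizing s with
  | nil => simp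
  | cons a t ih =>
    simp only [List.foldl_cons, List.countP_cons]
    by_cases h : p a = true
    · rw [if_pos h, ih]; simp [h]; ring
    · rw [if_neg h, ih]; simp [h]

-- B computes the number of similar pairs = pairsCnt of the canonB patterns
lemma countB_eq (ws : List String) :
    count_similar_pairs_alt ws
      = (pairsCnt (ws.map (fun w => canonB w.toList)) : Int) := by
  induction ws with
  | nil => simp [count_similar_pairs_alt, pairsCnt]
  | cons u rest ih =>
    simp only [count_similar_pairs_alt, List.map_cons, pairsCnt, ih]
    rw [foldl_count_eq_countP]
    have hc : rest.countP (fun v => similarB u v)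
        = (rest.map (fun w => canonB w.toList)).count (canonB u.toList) := by
      simp only [List.count, List.countP_map]
      apply List.countP_congr
      intro v _
      simp only [Function.comp]
      rw [show (similarB u v = true) ↔ _ from similarB_iff u v]
      constructor
      · intro h; simp [h]
      · intro h; exact (beq_iff_eq.mp h).symm
    rw [hc]
    push_cast
    ring

-- A's per-group summand as the casted Nat choose-2
lemma gInt_cast (n : Nat) :
    (if ((n : Int)) > 1 then PySem.Int.floordiv ((n : Int) * ((n : Int) - 1)) 2 else 0) = (Tn n : Int) := by
  by_cases h : n ≤ 1
  · interval_cases n <;> simp [Tn]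
  · have h2 : ((n : Int)) > 1 := by omega
    rw [if_pos h2]
    have hcast : (n : Int) * ((n : Int) - 1) = ((n * (n - 1) : Nat) : Int) := by
      push_cast [Nat.cast_sub (by omega : 1 ≤ n)]
      ring_nf
    rw [hcast]
    have := PySem.Int.floordiv_natCast (n * (n - 1)) 2
    rw [show ((2:Int)) = ((2:Nat):Int) by norm_num, this]
    rfl

lemma countA_eq (ws : List String) :
    count_similar_pairs ws = (pairsCnt (ws.map getPatternA) : Int) := by
  unfold count_similar_pairs
  show ((ws.foldl (fun d word =>
      let pattern := getPatternA word
      if d.contains pattern then d.modify pattern 0 (· + 1) else d.insert pattern 1)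
    PySem.Dict.empty).values.foldl (fun count v =>
      if v > 1 then count + PySem.Int.floordiv (v * (v - 1)) 2 else count) 0) = _
  have hstep : (fun (d : PySem.Dict String Int) word =>
      let pattern := getPatternA word
      if d.contains pattern then d.modify pattern 0 (· + 1) else d.insert pattern 1)
      = fun d word => d.modify (getPatternA word) 0 (· + 1) := by
    funext d word
    simp only
    by_cases h : d.contains (getPatternA word)
    · rw [if_pos h]
    · rw [if_neg h]
      show d.insert _ 1 = d.insert _ (d.getD _ 0 + 1)
      rw [PySem.Dict.getD_of_not_contains d 0 (by simpa using h)]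
      norm_num
  rw [hstep]
  have hfold : ws.foldl (fun d word => d.modify (getPatternA word) 0 (· + 1)) PySem.Dict.empty
      = PySem.Dict.counter (ws.map getPatternA) := by
    rw [PySem.Dict.counter_eq_foldl, List.foldl_map]
  rw [hfold]
  have hvals : (PySem.Dict.counter (ws.map getPatternA)).values
      = (PySem.Set.ofList (ws.map getPatternA)).map (fun k => ((ws.map getPatternA).count k : Int)) := by
    show (PySem.Dict.counter (ws.map getPatternA)).items.map Prod.snd = _
    rw [PySem.Dict.items_counter, List.map_map]
    rfl
  rw [hvals]
  have hfn : (fun (count : Int) v => if v > 1 then count + PySem.Int.floordiv (v * (v - 1)) 2 else count)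
      = fun count v => count + (if v > 1 then PySem.Int.floordiv (v * (v - 1)) 2 else 0) := by
    funext c v
    split_ifs <;> simp
  rw [hfn, PySem.List.foldl_add, List.map_map]
  have hmap : ((PySem.Set.ofList (ws.map getPatternA)).map
      ((fun v => if v > 1 then PySem.Int.floordiv (v * (v - 1)) 2 else 0)
        ∘ (fun k => ((ws.map getPatternA).count k : Int))))
      = (PySem.Set.ofList (ws.map getPatternA)).map
          (fun k => ((Tn ((ws.map getPatternA).count k) : Nat) : Int)) := by
    apply List.map_congr_left
    intro k _
    simp only [Function.comp]
    exact gInt_cast _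
  rw [hmap]
  rw [show (PySem.Set.ofList (ws.map getPatternA)).map
        (fun k => ((Tn ((ws.map getPatternA).count k) : Nat) : Int))
      = ((PySem.Set.ofList (ws.map getPatternA)).map
          (fun k => Tn ((ws.map getPatternA).count k))).map (fun n : Nat => (n : Int)) by
    rw [List.map_map]; rfl]
  rw [← Nat.cast_list_sum, sumT]
  simp

-- ===== VERDICT (by name: the statement is the Claim_ definition above) =====
theorem count_similar_pairs_spec : Claim_equal_count_similar_pairs := by
  intro words hdom
  unfold Spec_count_similar_pairs
  have hdom' : ∀ w ∈ words, ∀ c ∈ w.toList, pvDomChar c = true := by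
    intro w hw
    have := (List.all_eq_true.mp hdom) w hw
    simpa [pvDomStr, List.all_eq_true] using this
  rw [countA_eq, countB_eq]
  congr 1
  apply pairs_congr_map
  intro x hx y hy
  rw [getPatternA_eq (hdom' x hx), getPatternA_eq (hdom' y hy), String.ofList_inj]
  exact canon_equiv (hdom' x hx) (hdom' y hy)
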